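-- pv_equiv track=rewrite | github.com/kuznetsovvj/education | algorithms/codeforces/1722d.py | check
-- ===== SOURCE A (Python) =====
-- def check(seq):
--     dt, cnt = [], 0
--     for i in range(len(seq)):
--         if seq[i] == 'L':
--             cnt += i
--             dt.append(max(len(seq) - 1 - i, i) - i)
--         else:
--             cnt += len(seq) - 1 - i
--             dt.append(max(len(seq) - 1 - i, i) - (len(seq) - 1 - i))
--     dt.sort(reverse=True)
--
--     for i in range(1, len(dt)):
--         dt[i] += dt[i-1]
--
--     for i in range(len(dt)):
--         dt[i] += cnt
--
--     return dt
-- ===== SOURCE B (Python) =====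
-- def check(seq):
--     # Counting sort over the bounded deltas (each in [0, n-1]) instead of
--     # comparison sort; prefix sums and the +cnt shift fused into the emission.
--     n = len(seq)
--     cnt = 0
--     counts = {}
--     for i, ch in enumerate(seq):
--         if ch == 'L':
--             cnt += i
--             d = max(n - 1 - i, i) - i
--         else:
--             cnt += n - 1 - i
--             d = max(n - 1 - i, i) - (n - 1 - i)
--         counts[d] = counts.get(d, 0) + 1
--     res = []
--     total = cnt
--     for v in range(n - 1, -1, -1):
--         for _ in range(counts.get(v, 0)):
--             total += v
--             res.append(total)
--     return res
-- ===== Notes on version B (the rewrite author's own statement) =====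
-- stated objective: alternative
-- what changed: replaces the comparison sort plus two fix-up passes (prefix sums, +cnt) by a counting sort over the bounded deltas (each in [0, n-1]) with the prefix-summing and the +cnt shift fused into the descending emission loop
import Mathlib
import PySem

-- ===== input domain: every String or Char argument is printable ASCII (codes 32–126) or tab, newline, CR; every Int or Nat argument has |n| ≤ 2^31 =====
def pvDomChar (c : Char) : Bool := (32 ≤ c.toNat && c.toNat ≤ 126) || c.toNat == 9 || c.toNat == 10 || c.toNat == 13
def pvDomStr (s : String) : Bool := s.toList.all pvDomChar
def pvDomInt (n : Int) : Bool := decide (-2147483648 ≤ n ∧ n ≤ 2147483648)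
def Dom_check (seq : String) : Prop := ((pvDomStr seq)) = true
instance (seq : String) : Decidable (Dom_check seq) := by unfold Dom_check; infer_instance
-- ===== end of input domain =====

-- B replaces A's comparison sort + prefix-sum + (+cnt) passes by a counting sort over the
-- bounded deltas with the prefix sums and the +cnt shift fused into one descending emission loop
-- (alternative algorithm; not measurably faster in CPython).

-- ===== PORT A =====
-- the in-place loop 'for i in range(1, len(dt)): dt[i] += dt[i-1]' as structural recursion
def pvScanA (prev : Int) : List Int → List Int
  | [] => []
  | x :: xs => (x + prev) :: pvScanA (x + prev) xs

def check (seq : String) : List Int :=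
  let n : Int := (seq.toList.length : Int)
  let p := (PySem.List.pyRange 0 n 1).foldl (fun (st : List Int × Int) i =>
      -- seq[i]: i always in range here, so the total indexing form is exact
      let c := PySem.List.pyGetD seq.toList i ' '
      if c = 'L' then
        (st.1 ++ [max (n - 1 - i) i - i], st.2 + i)
      else
        (st.1 ++ [max (n - 1 - i) i - (n - 1 - i)], st.2 + (n - 1 - i)))
    ([], 0)
  let s := PySem.List.sorted p.1 (fun x => x) true
  let s2 := match s with
    | [] => []
    | h :: t => h :: pvScanA h t
  s2.map (· + p.2)

-- ===== PORT B =====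
-- inner loop 'for _ in range(c): total += v; res.append(total)': returns (final total, appended items)
def pvEmitRep (v t : Int) : Nat → Int × List Int
  | 0 => (t, [])
  | k+1 =>
    let t' := t + v
    let r := pvEmitRep v t' k
    (r.1, t' :: r.2)

def check_alt (seq : String) : List Int :=
  let n : Int := (seq.toList.length : Int)
  let st := (PySem.List.enumerate seq.toList 0).foldl
      (fun (st : Int × PySem.Dict Int Int) ic =>
        if ic.2 = 'L' then
          let d := max (n - 1 - ic.1) ic.1 - ic.1
          (st.1 + ic.1, st.2.insert d (st.2.getD d 0 + 1))
        else
          let d := max (n - 1 - ic.1) ic.1 - (n - 1 - ic.1)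
          (st.1 + (n - 1 - ic.1), st.2.insert d (st.2.getD d 0 + 1)))
      (0, PySem.Dict.empty)
  let fin := (PySem.List.pyRange (n - 1) (-1) (-1)).foldl
      (fun (acc : Int × List Int) v =>
        let e := pvEmitRep v acc.1 (st.2.getD v 0).toNat
        (e.1, acc.2 ++ e.2))
      (st.1, [])
  fin.2

-- ===== PRECONDITION & SPEC =====
def Spec_check (seq : String) (out : List Int) : Prop := out = check_alt seq
instance (seq : String) (out : List Int) : Decidable (Spec_check seq out) := by unfold Spec_check; infer_instance

-- ===== CLAIM (what is proved, stated in full; the proofs are below) =====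
def Claim_equal_check : Prop := ∀ (seq : String), Dom_check seq → Spec_check seq (check seq)

-- ===== LEMMAS AND PROOFS =====

-- per-character delta and cost, shared by both characterisations
def pvD (n : Int) (ic : Int × Char) : Int :=
  if ic.2 = 'L' then max (n - 1 - ic.1) ic.1 - ic.1 else max (n - 1 - ic.1) ic.1 - (n - 1 - ic.1)
def pvC (n : Int) (ic : Int × Char) : Int :=
  if ic.2 = 'L' then ic.1 else n - 1 - ic.1

-- running-total emission: emit t [v1, v2, …] = [t+v1, t+v1+v2, …]
def pvEmit (t : Int) : List Int → List Int
  | [] => []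
  | v :: vs => (t + v) :: pvEmit (t + v) vs

theorem pvEmit_append (l1 l2 : List Int) : ∀ t,
    pvEmit t (l1 ++ l2) = pvEmit t l1 ++ pvEmit (t + l1.sum) l2 := by
  induction l1 with
  | nil => intro t; simp [pvEmit]
  | cons x xs ih => intro t; simp [pvEmit, ih (t + x), add_assoc]

theorem pvScanA_map (c : Int) : ∀ (l : List Int) (p : Int),
    (pvScanA p l).map (· + c) = pvEmit (p + c) l := by
  intro l
  induction l with
  | nil => intro p; simp [pvScanA, pvEmit]
  | cons x xs ih =>
    intro p
    simp only [pvScanA, pvEmit, List.map_cons, ih (x + p)]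
    have h : x + p + c = p + c + x := by ring
    rw [h]

theorem pvEmitRep_eq (v : Int) : ∀ (k : Nat) (t : Int),
    pvEmitRep v t k = (t + k * v, pvEmit t (List.replicate k v)) := by
  intro k
  induction k with
  | zero => intro t; simp [pvEmitRep, pvEmit]
  | succ m ih =>
    intro t
    simp only [pvEmitRep, ih (t + v), List.replicate_succ, pvEmit, Prod.mk.injEq]
    exact ⟨by push_cast; ring, trivial⟩

-- B's outer loop as one emission over the expansion of the counts
theorem pvFoldEmit (cnt : PySem.Dict Int Int) : ∀ (vs : List Int) (t : Int) (r : List Int),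
    vs.foldl (fun (acc : Int × List Int) v =>
        let e := pvEmitRep v acc.1 (cnt.getD v 0).toNat
        (e.1, acc.2 ++ e.2)) (t, r)
      = (t + (vs.flatMap (fun v => List.replicate (cnt.getD v 0).toNat v)).sum,
         r ++ pvEmit t (vs.flatMap (fun v => List.replicate (cnt.getD v 0).toNat v))) := by
  intro vs
  induction vs with
  | nil => intro t r; simp [pvEmit]
  | cons v vs ih =>
    intro t r
    rw [List.foldl_cons]
    have hst : (let e := pvEmitRep v (t, r).1 (cnt.getD v 0).toNat
        ((e.1 : Int), (t, r).2 ++ e.2))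
        = (t + ((cnt.getD v 0).toNat : Int) * v,
           r ++ pvEmit t (List.replicate (cnt.getD v 0).toNat v)) := by
      simp [pvEmitRep_eq]
    rw [hst, ih]
    rw [List.flatMap_cons, pvEmit_append, List.sum_append, List.sum_replicate]
    rw [Prod.mk.injEq]
    exact ⟨by simp only [nsmul_eq_mul]; ring, by rw [List.append_assoc, nsmul_eq_mul]⟩

-- counting the expansion of a nodup value list
theorem pvCount_flatMap (l : List Int) : ∀ (vs : List Int), vs.Nodup → ∀ (a : Int),
    (vs.flatMap (fun v => List.replicate (l.count v) v)).count a
      = if a ∈ vs then l.count a else 0 := by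
  intro vs
  induction vs with
  | nil => intro _ a; simp
  | cons v vs ih =>
    intro hnd a
    rcases List.nodup_cons.mp hnd with ⟨hv, hnd'⟩
    simp only [List.flatMap_cons, List.count_append, List.count_replicate, ih hnd',
      List.mem_cons]
    by_cases hav : a = v
    · subst hav
      simp [hv]
    · simp [hav, Ne.symm hav]

theorem pvPerm_flatMap (l vs : List Int) (hnd : vs.Nodup) (hmem : ∀ x ∈ l, x ∈ vs) :
    (vs.flatMap (fun v => List.replicate (l.count v) v)).Perm l := by
  rw [List.perm_iff_count]
  intro a
  rw [pvCount_flatMap l vs hnd a]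
  by_cases h : a ∈ vs
  · simp [h]
  · simp [h, List.count_eq_zero_of_not_mem (fun hc => h (hmem a hc))]

theorem pvPairwise_replicate (v : Int) (k : Nat) :
    (List.replicate k v).Pairwise (fun a b : Int => b ≤ a) := by
  induction k with
  | zero => simp
  | succ m ih =>
    rw [List.replicate_succ]
    exact List.pairwise_cons.mpr ⟨fun b hb => le_of_eq (List.eq_of_mem_replicate hb), ih⟩

theorem pvPairwise_flatMap (l : List Int) : ∀ (vs : List Int), vs.Pairwise (fun a b => b < a) →
    (vs.flatMap (fun v => List.replicate (l.count v) v)).Pairwise (fun a b : Int => b ≤ a) := by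
  intro vs
  induction vs with
  | nil => intro _; simp
  | cons v vs ih =>
    intro hp
    rcases List.pairwise_cons.mp hp with ⟨hv, hp'⟩
    simp only [List.flatMap_cons]
    rw [List.pairwise_append]
    refine ⟨pvPairwise_replicate v _, ih hp', ?_⟩
    intro a ha b hb
    rcases List.mem_flatMap.mp hb with ⟨w, hw, hbw⟩
    have hav : a = v := List.eq_of_mem_replicate ha
    have hbwv : b = w := List.eq_of_mem_replicate hbw
    rw [hav, hbwv]
    exact le_of_lt (hv w hw)

-- uniqueness of the descending arrangement: any pairwise-(≥) permutation IS sorted(…, reverse=True)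
theorem pvSortedRev_eq (xs ys : List Int) (hp : ys.Perm xs)
    (hs : ys.Pairwise (fun a b : Int => b ≤ a)) :
    PySem.List.sorted xs (fun x => x) true = ys := by
  haveI : Std.Antisymm (fun a b : Int => b ≤ a) := ⟨fun a b h1 h2 => le_antisymm h2 h1⟩
  have h1 : (PySem.List.sorted xs (fun x => x) true).Perm ys :=
    (PySem.List.sorted_perm xs (fun x => x) true).trans hp.symm
  have h2 : (PySem.List.sorted xs (fun x => x) true).Pairwise (fun a b : Int => b ≤ a) :=
    PySem.List.sorted_pairwise_rev xs (fun x => x)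
  exact List.Perm.eq_of_pairwise' h2 hs h1

-- the deltas are bounded: 0 ≤ pvD n ic ≤ n - 1 for every enumerated position
theorem pvD_bound (xs : List Char) (ic : Int × Char)
    (hmem0 : ic ∈ PySem.List.enumerate xs 0) :
    0 ≤ pvD (xs.length : Int) ic ∧ pvD (xs.length : Int) ic ≤ (xs.length : Int) - 1 := by
  rcases (PySem.List.mem_enumerate_iff _ _ _).mp hmem0 with ⟨k, hk, rfl⟩
  simp only [pvD, zero_add]
  have hk' : (k : Int) < (xs.length : Int) := by exact_mod_cast hk
  have hk0 : (0 : Int) ≤ (k : Int) := Int.natCast_nonneg k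
  split_ifs <;> rcases le_total ((xs.length : Int) - 1 - k) (k : Int) with h | h <;>
    simp [max_eq_left h, max_eq_right h] <;> omega

-- A's first pass, characterised
theorem pvPassA (xs : List Char) (n : Int) (hn : n = (xs.length : Int)) :
    (PySem.List.pyRange 0 n 1).foldl (fun (st : List Int × Int) i =>
        let c := PySem.List.pyGetD xs i ' '
        if c = 'L' then
          (st.1 ++ [max (n - 1 - i) i - i], st.2 + i)
        else
          (st.1 ++ [max (n - 1 - i) i - (n - 1 - i)], st.2 + (n - 1 - i)))
      ([], 0)
      = ((PySem.List.enumerate xs 0).map (pvD n),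
         (PySem.List.enumerate xs 0).foldl (fun acc ic => acc + pvC n ic) 0) := by
  subst hn
  have hbody : (fun (st : List Int × Int) (i : Int) =>
      let c := PySem.List.pyGetD xs i ' '
      if c = 'L' then
        (st.1 ++ [max ((xs.length : Int) - 1 - i) i - i], st.2 + i)
      else
        (st.1 ++ [max ((xs.length : Int) - 1 - i) i - ((xs.length : Int) - 1 - i)],
         st.2 + ((xs.length : Int) - 1 - i)))
      = (fun (st : List Int × Int) (i : Int) =>
        (st.1 ++ [pvD (xs.length : Int) (i, PySem.List.pyGetD xs i ' ')],
         st.2 + pvC (xs.length : Int) (i, PySem.List.pyGetD xs i ' '))) := by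
    funext st i
    simp only [pvD, pvC]
    split_ifs <;> rfl
  rw [hbody,
    PySem.List.foldl_prod_mk
      (f := fun acc i => acc ++ [pvD (xs.length : Int) (i, PySem.List.pyGetD xs i ' ')])
      (g := fun acc i => acc + pvC (xs.length : Int) (i, PySem.List.pyGetD xs i ' ')),
    PySem.List.foldl_append_singleton_eq_map,
    PySem.List.enumerate_eq_map_pyRange xs ' ', List.foldl_map, List.map_map]
  simp [Function.comp]

-- B's first pass, characterised
theorem pvPassB (xs : List Char) (n : Int) :
    (PySem.List.enumerate xs 0).foldl
      (fun (st : Int × PySem.Dict Int Int) ic =>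
        if ic.2 = 'L' then
          let d := max (n - 1 - ic.1) ic.1 - ic.1
          (st.1 + ic.1, st.2.insert d (st.2.getD d 0 + 1))
        else
          let d := max (n - 1 - ic.1) ic.1 - (n - 1 - ic.1)
          (st.1 + (n - 1 - ic.1), st.2.insert d (st.2.getD d 0 + 1)))
      (0, PySem.Dict.empty)
      = ((PySem.List.enumerate xs 0).foldl (fun acc ic => acc + pvC n ic) 0,
         PySem.Dict.counter ((PySem.List.enumerate xs 0).map (pvD n))) := by
  have hbody : (fun (st : Int × PySem.Dict Int Int) (ic : Int × Char) =>
      (st.1 + pvC n ic, st.2.insert (pvD n ic) (st.2.getD (pvD n ic) 0 + 1)))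
      = (fun (st : Int × PySem.Dict Int Int) (ic : Int × Char) =>
        if ic.2 = 'L' then
          let d := max (n - 1 - ic.1) ic.1 - ic.1
          (st.1 + ic.1, st.2.insert d (st.2.getD d 0 + 1))
        else
          let d := max (n - 1 - ic.1) ic.1 - (n - 1 - ic.1)
          (st.1 + (n - 1 - ic.1), st.2.insert d (st.2.getD d 0 + 1))) := by
    funext st ic
    simp only [pvD, pvC]
    split_ifs <;> rfl
  rw [← hbody,
    PySem.List.foldl_prod_mk (f := fun acc ic => acc + pvC n ic)
      (g := fun (d : PySem.Dict Int Int) ic => d.insert (pvD n ic) (d.getD (pvD n ic) 0 + 1))]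
  congr 1
  rw [← PySem.Dict.foldl_insert_getD_add_one_eq_counter, List.foldl_map]

-- ===== VERDICT (by name: the statement is the Claim_ definition above) =====
theorem check_spec : Claim_equal_check := by
  intro seq _
  unfold Spec_check check check_alt
  set xs := seq.toList with hxs
  set n : Int := (xs.length : Int) with hn
  simp only
  rw [pvPassA xs n rfl, pvPassB xs n]
  set dts := (PySem.List.enumerate xs 0).map (pvD n) with hdts
  set cnt := (PySem.List.enumerate xs 0).foldl (fun acc ic => acc + pvC n ic) 0 with hcnt
  -- the value list of the counting sort
  set vs := PySem.List.pyRange (n - 1) (-1) (-1) with hvs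
  have hnd : vs.Nodup := by
    rw [hvs, PySem.List.pyRange_neg_one_eq_reverse]
    exact List.nodup_reverse.mpr (PySem.List.nodup_pyRange_one _ _)
  have hgt : vs.Pairwise (fun a b => b < a) := by
    rw [hvs, PySem.List.pyRange_neg_one_eq_reverse]
    rw [List.pairwise_reverse]
    exact PySem.List.pairwise_lt_pyRange_one _ _
  have hmem : ∀ x ∈ dts, x ∈ vs := by
    intro x hx
    rcases List.mem_map.mp hx with ⟨ic, hic, rfl⟩
    have hb := pvD_bound xs ic hic
    rw [hvs, PySem.List.mem_pyRange_neg_one, hn]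
    omega
  -- counts read back are list counts
  have hgetD : ∀ v : Int, ((PySem.Dict.counter dts).getD v 0).toNat = dts.count v := by
    intro v
    rw [PySem.Dict.getD_counter]
    simp
  set E := vs.flatMap (fun v => List.replicate (dts.count v) v) with hE
  have hEE : vs.flatMap (fun v => List.replicate ((PySem.Dict.counter dts).getD v 0).toNat v) = E := by
    rw [hE]
    congr 1
    funext v
    rw [hgetD v]
  have hperm : E.Perm dts := pvPerm_flatMap dts vs hnd hmem
  have hpair : E.Pairwise (fun a b : Int => b ≤ a) := pvPairwise_flatMap dts vs hgt
  have hsorted : PySem.List.sorted dts (fun x => x) true = E := pvSortedRev_eq dts E hperm hpair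
  rw [pvFoldEmit]
  simp only [hEE]
  rw [hsorted]
  -- both sides are now pvEmit cnt E
  cases E with
  | nil => simp [pvEmit]
  | cons h t =>
    simp only [List.map_cons, pvScanA_map, pvEmit]
    rw [show cnt + h = h + cnt from add_comm _ _, List.nil_append]
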